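-- pv_equiv track=rewrite | github.com/DryRainEnt/Greeum | greeum/viz/api.py | _infer_slot_theme
-- ===== SOURCE A (Python) =====
-- from typing import Dict, List, Any, Optional
--
-- def _infer_slot_theme(keywords: List[str], tags: List[Dict]) -> str:
--     """키워드/태그 기반 슬롯 테마 추론"""
--     # 간단한 휴리스틱 기반 테마 추론
--     all_terms = [k.lower() for k in keywords]
--     all_terms += [t["tag"].lower() for t in tags[:3]]
--
--     # 테마 패턴 매칭
--     if any(t in all_terms for t in ["구현", "완료", "fix", "개발", "코드"]):
--         return "개발 작업"
--     elif any(t in all_terms for t in ["분석", "설계", "전략", "계획"]):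
--         return "전략/설계"
--     elif any(t in all_terms for t in ["테스트", "검증", "확인", "버그"]):
--         return "테스트/검증"
--     elif any(t in all_terms for t in ["문서", "readme", "설명"]):
--         return "문서화"
--     elif any(t in all_terms for t in ["사용자", "질문", "요청"]):
--         return "사용자 상호작용"
--     elif any(t in all_terms for t in ["greeum", "grettel", "mcp"]):
--         return "프로젝트 기록"
--     else:
--         return "일반 기억"
-- ===== SOURCE B (Python) =====
-- from typing import Dict, List, Any, Optional
--
-- _THEME_PRIORITY = {
--     "구현": 0, "완료": 0, "fix": 0, "개발": 0, "코드": 0,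
--     "분석": 1, "설계": 1, "전략": 1, "계획": 1,
--     "테스트": 2, "검증": 2, "확인": 2, "버그": 2,
--     "문서": 3, "readme": 3, "설명": 3,
--     "사용자": 4, "질문": 4, "요청": 4,
--     "greeum": 5, "grettel": 5, "mcp": 5,
-- }
--
-- _THEMES = ["개발 작업", "전략/설계", "테스트/검증", "문서화",
--            "사용자 상호작용", "프로젝트 기록", "일반 기억"]
--
-- def _infer_slot_theme(keywords: List[str], tags: List[Dict]) -> str:
--     terms = [k.lower() for k in keywords]
--     terms += [t["tag"].lower() for t in tags[:3]]
--     best = 6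
--     for term in terms:
--         i = _THEME_PRIORITY.get(term, 6)
--         if i < best:
--             best = i
--     return _THEMES[best]
-- ===== Notes on version B (the rewrite author's own statement) =====
-- stated objective: alternative
-- what changed: Replaces the six-branch if/elif chain of membership scans over all_terms with a precomputed term-to-priority dictionary and a single min-tracking pass over the terms, indexing a theme table by the winning priority.
import Mathlib
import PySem

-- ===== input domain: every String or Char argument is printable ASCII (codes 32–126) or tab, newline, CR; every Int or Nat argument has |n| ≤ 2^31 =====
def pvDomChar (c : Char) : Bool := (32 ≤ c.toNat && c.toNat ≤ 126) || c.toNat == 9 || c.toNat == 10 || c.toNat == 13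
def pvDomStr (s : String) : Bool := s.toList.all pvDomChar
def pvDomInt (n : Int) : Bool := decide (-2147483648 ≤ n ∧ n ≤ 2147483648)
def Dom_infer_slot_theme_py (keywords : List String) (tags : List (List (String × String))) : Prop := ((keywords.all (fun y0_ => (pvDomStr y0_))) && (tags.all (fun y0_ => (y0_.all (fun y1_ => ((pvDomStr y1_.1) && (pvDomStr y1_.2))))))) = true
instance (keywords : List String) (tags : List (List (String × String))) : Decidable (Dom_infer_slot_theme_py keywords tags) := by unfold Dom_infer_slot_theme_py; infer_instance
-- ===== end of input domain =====

-- B replaces A's if/elif chain of membership scans with a term→priority dictionary,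
-- one min-tracking pass over the terms, and a theme table indexed by the winner (objective: alternative).

-- ===== PORT A =====
-- A's if/elif chain: each branch is `any(t in all_terms for t in [...])`.
def infer_slot_theme_py (keywords : List String) (tags : List (List (String × String))) : String :=
  let all_terms : List String :=
    keywords.map PySem.Str.lower ++
      (PySem.List.slice tags none (some 3)).map
        (fun t => PySem.Str.lower (((PySem.Dict.mk t).get? "tag").getD ""))
  if (["구현", "완료", "fix", "개발", "코드"] : List String).any (fun t => all_terms.contains t) then "개발 작업"
  else if (["분석", "설계", "전략", "계획"] : List String).any (fun t => all_terms.contains t) then "전략/설계"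
  else if (["테스트", "검증", "확인", "버그"] : List String).any (fun t => all_terms.contains t) then "테스트/검증"
  else if (["문서", "readme", "설명"] : List String).any (fun t => all_terms.contains t) then "문서화"
  else if (["사용자", "질문", "요청"] : List String).any (fun t => all_terms.contains t) then "사용자 상호작용"
  else if (["greeum", "grettel", "mcp"] : List String).any (fun t => all_terms.contains t) then "프로젝트 기록"
  else "일반 기억"

-- ===== PORT B =====
-- B's module-level dict _THEME_PRIORITY and list _THEMES.
def pvThemePrio : PySem.Dict String Nat := PySem.Dict.mk
  [("구현", 0), ("완료", 0), ("fix", 0), ("개발", 0), ("코드", 0),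
   ("분석", 1), ("설계", 1), ("전략", 1), ("계획", 1),
   ("테스트", 2), ("검증", 2), ("확인", 2), ("버그", 2),
   ("문서", 3), ("readme", 3), ("설명", 3),
   ("사용자", 4), ("질문", 4), ("요청", 4),
   ("greeum", 5), ("grettel", 5), ("mcp", 5)]

def pvThemes : List String :=
  ["개발 작업", "전략/설계", "테스트/검증", "문서화", "사용자 상호작용", "프로젝트 기록", "일반 기억"]

-- _THEME_PRIORITY.get(term, 6)
def pvPrio (t : String) : Nat := (pvThemePrio.get? t).getD 6

-- the loop body: `i = _THEME_PRIORITY.get(term, 6); if i < best: best = i`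
def pvStep (best : Nat) (term : String) : Nat :=
  let i := pvPrio term
  if i < best then i else best

def infer_slot_theme_py_alt (keywords : List String) (tags : List (List (String × String))) : String :=
  let terms : List String :=
    keywords.map PySem.Str.lower ++
      (PySem.List.slice tags none (some 3)).map
        (fun t => PySem.Str.lower (((PySem.Dict.mk t).get? "tag").getD ""))
  let best := terms.foldl pvStep 6
  pvThemes.getD best ""

-- ===== PRECONDITION & SPEC =====
-- Pre_ excludes exactly the inputs where Python raises KeyError: a dict among the first
-- three tags without a "tag" key (both A and B raise there).
def Pre_infer_slot_theme_py (keywords : List String) (tags : List (List (String × String))) : Prop :=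
  ∀ t ∈ PySem.List.slice tags none (some 3), "tag" ∈ t.map Prod.fst
instance (keywords : List String) (tags : List (List (String × String))) : Decidable (Pre_infer_slot_theme_py keywords tags) := by unfold Pre_infer_slot_theme_py; infer_instance

def pvWitness_infer_slot_theme_py : List String × (List (List (String × String))) :=
  (["Fix", "hello"], [[("tag", "MCP"), ("x", "y")]])

def Spec_infer_slot_theme_py (keywords : List String) (tags : List (List (String × String))) (out : String) : Prop := out = infer_slot_theme_py_alt keywords tags
instance (keywords : List String) (tags : List (List (String × String))) (out : String) : Decidable (Spec_infer_slot_theme_py keywords tags out) := by unfold Spec_infer_slot_theme_py; infer_instance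

-- ===== CLAIM (what is proved, stated in full; the proofs are below) =====
def Claim_equal_infer_slot_theme_py : Prop := ∀ (keywords : List String) (tags : List (List (String × String))), Dom_infer_slot_theme_py keywords tags → Pre_infer_slot_theme_py keywords tags → Spec_infer_slot_theme_py keywords tags (infer_slot_theme_py keywords tags)


-- ===== LEMMAS AND PROOFS =====

set_option maxHeartbeats 1000000 in
theorem pvPrio_eq (t : String) :
    pvPrio t =
      if t ∈ (["구현", "완료", "fix", "개발", "코드"] : List String) then 0
      else if t ∈ (["분석", "설계", "전략", "계획"] : List String) then 1
      else if t ∈ (["테스트", "검증", "확인", "버그"] : List String) then 2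
      else if t ∈ (["문서", "readme", "설명"] : List String) then 3
      else if t ∈ (["사용자", "질문", "요청"] : List String) then 4
      else if t ∈ (["greeum", "grettel", "mcp"] : List String) then 5
      else 6 := by
  by_cases hall : t ∈ (["구현", "완료", "fix", "개발", "코드", "분석", "설계", "전략", "계획",
      "테스트", "검증", "확인", "버그", "문서", "readme", "설명", "사용자", "질문", "요청",
      "greeum", "grettel", "mcp"] : List String)
  · fin_cases hall <;> decide
  · simp only [List.mem_cons, List.not_mem_nil, or_false, not_or] at hall
    obtain ⟨n1, n2, n3, n4, n5, n6, n7, n8, n9, n10, n11, n12, n13, n14, n15, n16, n17, n18, n19, n20, n21, n22⟩ := hall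
    simp only [pvPrio, pvThemePrio, PySem.Dict.get?_mk_cons, beq_iff_eq]
    rw [if_neg (Ne.symm n1), if_neg (Ne.symm n2), if_neg (Ne.symm n3), if_neg (Ne.symm n4), if_neg (Ne.symm n5), if_neg (Ne.symm n6), if_neg (Ne.symm n7), if_neg (Ne.symm n8), if_neg (Ne.symm n9), if_neg (Ne.symm n10), if_neg (Ne.symm n11), if_neg (Ne.symm n12), if_neg (Ne.symm n13), if_neg (Ne.symm n14), if_neg (Ne.symm n15), if_neg (Ne.symm n16), if_neg (Ne.symm n17), if_neg (Ne.symm n18), if_neg (Ne.symm n19), if_neg (Ne.symm n20), if_neg (Ne.symm n21), if_neg (Ne.symm n22)]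
    simp [PySem.Dict.get?, n1, n2, n3, n4, n5, n6, n7, n8, n9, n10, n11, n12, n13, n14, n15, n16, n17, n18, n19, n20, n21, n22]

theorem pvPrio_le6 (t : String) : pvPrio t ≤ 6 := by
  rw [pvPrio_eq]; split_ifs <;> omega

theorem pvStep_eq_min (b : Nat) (t : String) : pvStep b t = min b (pvPrio t) := by
  simp only [pvStep]; split <;> omega

theorem pvFold_le_init : ∀ (ts : List String) (b : Nat), ts.foldl pvStep b ≤ b := by
  intro ts
  induction ts with
  | nil => simp
  | cons x xs ih =>
    intro b
    simp only [List.foldl_cons]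
    exact le_trans (ih _) (by rw [pvStep_eq_min]; omega)

theorem pvFold_le_mem : ∀ (ts : List String) (b : Nat) (t : String), t ∈ ts →
    ts.foldl pvStep b ≤ pvPrio t := by
  intro ts
  induction ts with
  | nil => intro b t h; cases h
  | cons x xs ih =>
    intro b t h
    simp only [List.foldl_cons]
    rcases List.mem_cons.mp h with rfl | h'
    · exact le_trans (pvFold_le_init _ _) (by rw [pvStep_eq_min]; omega)
    · exact ih _ t h'

theorem pvFold_ge : ∀ (ts : List String) (b c : Nat), c ≤ b →
    (∀ t ∈ ts, c ≤ pvPrio t) → c ≤ ts.foldl pvStep b := by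
  intro ts
  induction ts with
  | nil => intro b c hb _; simpa
  | cons x xs ih =>
    intro b c hb h
    simp only [List.foldl_cons]
    refine ih _ c ?_ (fun t ht => h t (List.mem_cons_of_mem _ ht))
    have := h x List.mem_cons_self
    rw [pvStep_eq_min]; omega

theorem pvFold_eq (ts : List String) (i : Nat) (p : String) (hp : p ∈ ts)
    (hpi : pvPrio p = i) (hge : ∀ t ∈ ts, i ≤ pvPrio t) :
    ts.foldl pvStep 6 = i := by
  have h1 := pvFold_le_mem ts 6 p hp
  have h2 := pvFold_ge ts 6 i (hpi ▸ pvPrio_le6 p) hge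
  omega

-- the core: A's if/elif chain equals B's theme-table lookup, for any term list
theorem pv_core (ts : List String) :
    (if (["구현", "완료", "fix", "개발", "코드"] : List String).any (fun t => ts.contains t) then "개발 작업"
     else if (["분석", "설계", "전략", "계획"] : List String).any (fun t => ts.contains t) then "전략/설계"
     else if (["테스트", "검증", "확인", "버그"] : List String).any (fun t => ts.contains t) then "테스트/검증"
     else if (["문서", "readme", "설명"] : List String).any (fun t => ts.contains t) then "문서화"
     else if (["사용자", "질문", "요청"] : List String).any (fun t => ts.contains t) then "사용자 상호작용"
     else if (["greeum", "grettel", "mcp"] : List String).any (fun t => ts.contains t) then "프로젝트 기록"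
     else "일반 기억")
    = pvThemes.getD (ts.foldl pvStep 6) "" := by
  have hmem : ∀ (g : List String), (g.any fun t => ts.contains t) = true ↔ ∃ p ∈ g, p ∈ ts := by
    intro g; simp [List.any_eq_true]
  by_cases h0 : ((["구현", "완료", "fix", "개발", "코드"] : List String).any fun t => ts.contains t) = true
  · rw [if_pos h0]
    obtain ⟨p, hpg, hpts⟩ := (hmem _).mp h0
    have hf : ts.foldl pvStep 6 = 0 :=
      pvFold_eq ts 0 p hpts (by fin_cases hpg <;> rfl) (fun t _ => Nat.zero_le _)
    rw [hf]; rfl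
  · rw [if_neg h0]
    have hn0 : ∀ t ∈ ts, t ∉ (["구현", "완료", "fix", "개발", "코드"] : List String) :=
      fun t ht htg => h0 ((hmem _).mpr ⟨t, htg, ht⟩)
    by_cases h1 : ((["분석", "설계", "전략", "계획"] : List String).any fun t => ts.contains t) = true
    · rw [if_pos h1]
      obtain ⟨p, hpg, hpts⟩ := (hmem _).mp h1
      have hf : ts.foldl pvStep 6 = 1 := by
        refine pvFold_eq ts 1 p hpts (by fin_cases hpg <;> rfl) ?_
        intro t ht; rw [pvPrio_eq]
        split_ifs <;> first | omega | exact absurd ‹_› (hn0 t ht)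
      rw [hf]; rfl
    · rw [if_neg h1]
      have hn1 : ∀ t ∈ ts, t ∉ (["분석", "설계", "전략", "계획"] : List String) :=
        fun t ht htg => h1 ((hmem _).mpr ⟨t, htg, ht⟩)
      by_cases h2 : ((["테스트", "검증", "확인", "버그"] : List String).any fun t => ts.contains t) = true
      · rw [if_pos h2]
        obtain ⟨p, hpg, hpts⟩ := (hmem _).mp h2
        have hf : ts.foldl pvStep 6 = 2 := by
          refine pvFold_eq ts 2 p hpts (by fin_cases hpg <;> rfl) ?_
          intro t ht; rw [pvPrio_eq]
          split_ifs <;> first | omega | exact absurd ‹_› (hn0 t ht) | exact absurd ‹_› (hn1 t ht)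
        rw [hf]; rfl
      · rw [if_neg h2]
        have hn2 : ∀ t ∈ ts, t ∉ (["테스트", "검증", "확인", "버그"] : List String) :=
          fun t ht htg => h2 ((hmem _).mpr ⟨t, htg, ht⟩)
        by_cases h3 : ((["문서", "readme", "설명"] : List String).any fun t => ts.contains t) = true
        · rw [if_pos h3]
          obtain ⟨p, hpg, hpts⟩ := (hmem _).mp h3
          have hf : ts.foldl pvStep 6 = 3 := by
            refine pvFold_eq ts 3 p hpts (by fin_cases hpg <;> rfl) ?_
            intro t ht; rw [pvPrio_eq]
            split_ifs <;> first | omega | exact absurd ‹_› (hn0 t ht) | exact absurd ‹_› (hn1 t ht) | exact absurd ‹_› (hn2 t ht)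
          rw [hf]; rfl
        · rw [if_neg h3]
          have hn3 : ∀ t ∈ ts, t ∉ (["문서", "readme", "설명"] : List String) :=
            fun t ht htg => h3 ((hmem _).mpr ⟨t, htg, ht⟩)
          by_cases h4 : ((["사용자", "질문", "요청"] : List String).any fun t => ts.contains t) = true
          · rw [if_pos h4]
            obtain ⟨p, hpg, hpts⟩ := (hmem _).mp h4
            have hf : ts.foldl pvStep 6 = 4 := by
              refine pvFold_eq ts 4 p hpts (by fin_cases hpg <;> rfl) ?_
              intro t ht; rw [pvPrio_eq]
              split_ifs <;> first | omega | exact absurd ‹_› (hn0 t ht) | exact absurd ‹_› (hn1 t ht) | exact absurd ‹_› (hn2 t ht) | exact absurd ‹_› (hn3 t ht)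
            rw [hf]; rfl
          · rw [if_neg h4]
            have hn4 : ∀ t ∈ ts, t ∉ (["사용자", "질문", "요청"] : List String) :=
              fun t ht htg => h4 ((hmem _).mpr ⟨t, htg, ht⟩)
            by_cases h5 : ((["greeum", "grettel", "mcp"] : List String).any fun t => ts.contains t) = true
            · rw [if_pos h5]
              obtain ⟨p, hpg, hpts⟩ := (hmem _).mp h5
              have hf : ts.foldl pvStep 6 = 5 := by
                refine pvFold_eq ts 5 p hpts (by fin_cases hpg <;> rfl) ?_
                intro t ht; rw [pvPrio_eq]
                split_ifs <;> first | omega | exact absurd ‹_› (hn0 t ht) | exact absurd ‹_› (hn1 t ht) | exact absurd ‹_› (hn2 t ht) | exact absurd ‹_› (hn3 t ht) | exact absurd ‹_› (hn4 t ht)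
              rw [hf]; rfl
            · rw [if_neg h5]
              have hn5 : ∀ t ∈ ts, t ∉ (["greeum", "grettel", "mcp"] : List String) :=
                fun t ht htg => h5 ((hmem _).mpr ⟨t, htg, ht⟩)
              have hge : ∀ t ∈ ts, 6 ≤ pvPrio t := by
                intro t ht; rw [pvPrio_eq]
                split_ifs <;> first | omega | exact absurd ‹_› (hn0 t ht) | exact absurd ‹_› (hn1 t ht) | exact absurd ‹_› (hn2 t ht) | exact absurd ‹_› (hn3 t ht) | exact absurd ‹_› (hn4 t ht) | exact absurd ‹_› (hn5 t ht)
              have hf : ts.foldl pvStep 6 = 6 :=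
                Nat.le_antisymm (pvFold_le_init _ _) (pvFold_ge ts 6 6 le_rfl hge)
              rw [hf]; rfl

-- ===== VERDICT (by name: the statement is the Claim_ definition above) =====
theorem infer_slot_theme_py_spec : Claim_equal_infer_slot_theme_py := by
  intro keywords tags _ _
  unfold Spec_infer_slot_theme_py infer_slot_theme_py infer_slot_theme_py_alt
  exact pv_core _
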